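-- pv_equiv track=rewrite | github.com/grigoresc/adventofcode.2018 | 07/run.py | buildDefs
-- ===== SOURCE A (Python) =====
-- def buildDefs(steps):
--     deps = dict()
--     for step in steps:
--         if step[1] not in deps.keys():
--             deps[step[1]] = set()
--         deps[step[1]].add(step[0])
--         if step[0] not in deps.keys():
--             deps[step[0]] = set()
--     return deps
-- ===== SOURCE B (Python) =====
-- def buildDefs(steps):
--     order = []
--     for a, b in steps:
--         if b not in order:
--             order.append(b)
--         if a not in order:
--             order.append(a)
--     return {k: {a for a, b in steps if b == k} for k in order}
-- ===== Notes on version B (the rewrite author's own statement) =====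
-- stated objective: alternative
-- what changed: B drops A's incrementally mutated dict-of-sets entirely: it first computes the key order as a first-occurrence dedup list, then builds the result by a per-key grouping comprehension that rescans the steps, instead of A's single pass of conditional dict insertions and in-place set.add.
import Mathlib
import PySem

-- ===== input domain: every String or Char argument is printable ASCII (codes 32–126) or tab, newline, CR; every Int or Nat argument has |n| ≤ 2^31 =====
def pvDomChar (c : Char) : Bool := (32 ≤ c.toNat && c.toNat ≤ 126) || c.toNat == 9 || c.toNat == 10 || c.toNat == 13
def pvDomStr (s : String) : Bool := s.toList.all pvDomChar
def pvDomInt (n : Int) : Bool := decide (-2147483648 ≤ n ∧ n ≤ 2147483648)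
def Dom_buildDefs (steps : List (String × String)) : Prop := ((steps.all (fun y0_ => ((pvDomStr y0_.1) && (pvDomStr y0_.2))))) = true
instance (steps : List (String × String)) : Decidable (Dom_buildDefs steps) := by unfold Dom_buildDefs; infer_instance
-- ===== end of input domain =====

-- B abandons A's incrementally mutated dict-of-sets: it deduplicates the keys in first-occurrence order and then groups the predecessors per key by rescanning the steps; objective: alternative algorithm, same observable result.

-- ===== PORT A =====
-- one loop: ensure key step.2, add step.1 to its set, ensure key step.1
def buildDefs (steps : List (String × String)) : List (String × List String) :=
  (steps.foldl (fun deps step =>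
      let deps := if deps.contains step.2 then deps else deps.insert step.2 PySem.Set.empty
      let deps := deps.modify step.2 PySem.Set.empty (fun s => PySem.Set.add s step.1)
      if deps.contains step.1 then deps else deps.insert step.1 PySem.Set.empty)
    PySem.Dict.empty).items

-- ===== PORT B =====
-- pass 1: key order = first occurrence of b then a per step; pass 2: comprehension grouping the predecessors of each key
def buildDefs_alt (steps : List (String × String)) : List (String × List String) :=
  let order := steps.foldl (fun o s =>
      let o := if s.2 ∈ o then o else o ++ [s.2]
      if s.1 ∈ o then o else o ++ [s.1]) []
  order.map (fun k =>
    (k, steps.foldl (fun v s => if s.2 == k then PySem.Set.add v s.1 else v) PySem.Set.empty))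

-- ===== PRECONDITION & SPEC =====
def Spec_buildDefs (steps : List (String × String)) (out : List (String × List String)) : Prop := out = buildDefs_alt steps
instance (steps : List (String × String)) (out : List (String × List String)) : Decidable (Spec_buildDefs steps out) := by unfold Spec_buildDefs; infer_instance

-- ===== CLAIM (what is proved, stated in full; the proofs are below) =====
def Claim_equal_buildDefs : Prop := ∀ (steps : List (String × String)), Dom_buildDefs steps → Spec_buildDefs steps (buildDefs steps)

-- ===== LEMMAS AND PROOFS =====

-- A's per-step dict transformer, and proof-only abbreviations for its pieces
def pvEns (d : PySem.Dict String (PySem.Set String)) (k : String) : PySem.Dict String (PySem.Set String) :=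
  if d.contains k then d else d.insert k PySem.Set.empty

def pvAStep (d : PySem.Dict String (PySem.Set String)) (s : String × String) :
    PySem.Dict String (PySem.Set String) :=
  pvEns ((pvEns d s.2).modify s.2 PySem.Set.empty (fun v => PySem.Set.add v s.1)) s.1

-- B's per-step key-order transformer
def pvBKey (o : List String) (s : String × String) : List String :=
  let o := if s.2 ∈ o then o else o ++ [s.2]
  if s.1 ∈ o then o else o ++ [s.1]

theorem pvEns_eq_setdefault (d : PySem.Dict String (PySem.Set String)) (k : String) :
    pvEns d k = d.setdefault k PySem.Set.empty := by
  unfold pvEns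
  by_cases h : d.contains k = true
  · rw [if_pos h, PySem.Dict.setdefault_of_contains d PySem.Set.empty h]
  · rw [if_neg h, PySem.Dict.setdefault_of_not_contains d PySem.Set.empty (by simpa using h)]

theorem pvEns_contains (d : PySem.Dict String (PySem.Set String)) (k k' : String) :
    (pvEns d k).contains k' = (k' == k || d.contains k') := by
  rw [pvEns_eq_setdefault]; exact PySem.Dict.contains_setdefault d k k' PySem.Set.empty

theorem pvEns_getD (d : PySem.Dict String (PySem.Set String)) (k k' : String) :
    (pvEns d k).getD k' PySem.Set.empty = d.getD k' PySem.Set.empty := by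
  rw [pvEns_eq_setdefault]
  by_cases h : k' = k
  · subst h; exact PySem.Dict.getD_setdefault_self d k' PySem.Set.empty PySem.Set.empty
  · rw [PySem.Dict.getD_eq_get?_getD, PySem.Dict.get?_setdefault_of_ne d PySem.Set.empty h,
        ← PySem.Dict.getD_eq_get?_getD]

theorem pvEns_keys (d : PySem.Dict String (PySem.Set String)) (k : String) :
    (pvEns d k).keys = if k ∈ d.keys then d.keys else d.keys ++ [k] := by
  unfold pvEns
  rw [PySem.Dict.contains_eq_decide_mem_keys]
  by_cases h : k ∈ d.keys
  · simp [h]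
  · simp only [h, decide_false, if_false]
    exact PySem.Dict.keys_insert_of_not_contains d PySem.Set.empty
      (by rw [PySem.Dict.contains_eq_decide_mem_keys]; simp [h])

theorem pvEns_nodup (d : PySem.Dict String (PySem.Set String)) (k : String)
    (h : d.keys.Nodup) : (pvEns d k).keys.Nodup := by
  rw [pvEns_keys d k]
  by_cases hm : k ∈ d.keys
  · simpa [hm]
  · rw [if_neg hm]
    exact h.append (List.nodup_singleton k) (fun a ha hb => hm (List.mem_singleton.mp hb ▸ ha))

-- the modify in pvAStep hits an existing key, so it keeps the key list
theorem pvAStep_keys (d : PySem.Dict String (PySem.Set String)) (s : String × String)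
    (hnd : d.keys.Nodup) : (pvAStep d s).keys = pvBKey d.keys s := by
  have h2 : (pvEns d s.2).contains s.2 = true := by rw [pvEns_contains]; simp
  have hnd2 : (pvEns d s.2).keys.Nodup := pvEns_nodup d s.2 hnd
  have hmod : ((pvEns d s.2).modify s.2 PySem.Set.empty
      (fun v => PySem.Set.add v s.1)).keys = (pvEns d s.2).keys := by
    unfold PySem.Dict.modify
    exact PySem.Dict.keys_insert_of_contains _ _ h2
  have hmodnd : ((pvEns d s.2).modify s.2 PySem.Set.empty
      (fun v => PySem.Set.add v s.1)).keys.Nodup := by rw [hmod]; exact hnd2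
  unfold pvAStep pvBKey
  rw [pvEns_keys, hmod, pvEns_keys]

theorem pvAStep_nodup (d : PySem.Dict String (PySem.Set String)) (s : String × String)
    (hnd : d.keys.Nodup) : (pvAStep d s).keys.Nodup := by
  rw [pvAStep_keys d s hnd]
  unfold pvBKey
  have step : ∀ (K : List String) (k : String), K.Nodup →
      (if k ∈ K then K else K ++ [k]).Nodup := by
    intro K k hK
    by_cases hm : k ∈ K
    · simpa [hm]
    · rw [if_neg hm]
      exact hK.append (List.nodup_singleton k) (fun a ha hb => hm (List.mem_singleton.mp hb ▸ ha))
  exact step _ _ (step _ _ hnd)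

theorem pvAStep_getD (d : PySem.Dict String (PySem.Set String)) (s : String × String) (k : String) :
    (pvAStep d s).getD k PySem.Set.empty =
      if s.2 == k then PySem.Set.add (d.getD k PySem.Set.empty) s.1
      else d.getD k PySem.Set.empty := by
  unfold pvAStep
  rw [pvEns_getD, PySem.Dict.getD_modify, pvEns_getD]
  by_cases h : k = s.2
  · subst h; simp
  · simp only [if_neg h, beq_iff_eq, if_neg (Ne.symm h)]
    exact pvEns_getD d s.2 k

-- A's folded keys are B's key-order fold
theorem pvFold_keys (steps : List (String × String)) (d : PySem.Dict String (PySem.Set String))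
    (hnd : d.keys.Nodup) :
    (steps.foldl pvAStep d).keys = steps.foldl pvBKey d.keys := by
  induction steps generalizing d with
  | nil => rfl
  | cons s r ih =>
      simp only [List.foldl_cons]
      rw [ih (pvAStep d s) (pvAStep_nodup d s hnd), pvAStep_keys d s hnd]

theorem pvFold_nodup (steps : List (String × String)) (d : PySem.Dict String (PySem.Set String))
    (hnd : d.keys.Nodup) : (steps.foldl pvAStep d).keys.Nodup := by
  induction steps generalizing d with
  | nil => exact hnd
  | cons s r ih => exact ih (pvAStep d s) (pvAStep_nodup d s hnd)

-- A's folded lookup at k is B's per-key grouping fold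
theorem pvFold_getD (steps : List (String × String)) (d : PySem.Dict String (PySem.Set String))
    (k : String) :
    (steps.foldl pvAStep d).getD k PySem.Set.empty =
      steps.foldl (fun v s => if s.2 == k then PySem.Set.add v s.1 else v)
        (d.getD k PySem.Set.empty) := by
  induction steps generalizing d with
  | nil => rfl
  | cons s r ih =>
      simp only [List.foldl_cons]
      rw [ih (pvAStep d s), pvAStep_getD d s k]

-- ===== VERDICT (by name: the statement is the Claim_ definition above) =====
theorem buildDefs_spec : Claim_equal_buildDefs := by
  intro steps _
  unfold Spec_buildDefs buildDefs buildDefs_alt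
  show (steps.foldl pvAStep PySem.Dict.empty).items
      = (steps.foldl pvBKey []).map (fun k =>
          (k, steps.foldl (fun v s => if s.2 == k then PySem.Set.add v s.1 else v) PySem.Set.empty))
  rw [PySem.Dict.items_eq_map_keys _ (pvFold_nodup steps _ PySem.Dict.nodup_keys_empty) PySem.Set.empty,
      pvFold_keys steps _ PySem.Dict.nodup_keys_empty]
  refine List.map_congr_left (fun k _ => ?_)
  rw [pvFold_getD steps PySem.Dict.empty k]
  simp [PySem.Dict.getD_empty]
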